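-- pv_equiv track=rewrite | github.com/nbonfils/adventofcode2018 | day8/day8.py | part_two
-- ===== SOURCE A (Python) =====
-- def part_two(license, pos):
--     # get number of childs and number of metadata
--     num_child = license[pos]
--     num_metadata = license[pos + 1]
--
--     # if there is no child return the metadata array and the size of the node in
--     # the license number array
--     if num_child == 0:
--         return license[pos + 2:pos + 2 + num_metadata], 2 + num_metadata
--     else:
--         # get the first child metadata + size
--         metadata, total_size = part_two(license, pos + 2)
--
--         # build a metadata array containing ARRAY of metadata FROM the child nodes
--         # notice the "append" instead of "+="
--         child_metadata = []
--         child_metadata.append(metadata)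
--         for i in range(num_child - 1):
--             metadata, size = part_two(license, pos + 2 + total_size)
--             child_metadata.append(metadata)
--             total_size += size
--
--         # find the position of the current node metadata
--         metadata_idx = pos + 2 + total_size
--         metadata = license[metadata_idx:metadata_idx + num_metadata]
--
--         # build the resulting metadata according to the index in the metadata
--         resulting_metadata = []
--         for m in metadata:
--             if 0 < m and m <= len(child_metadata):
--                 resulting_metadata += child_metadata[m - 1]
--
--         return resulting_metadata, total_size + 2 + num_metadata
-- ===== SOURCE B (Python) =====
-- def part_two(license, pos):
--     # Iterative explicit-stack evaluator (no recursion): one left-to-right scan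
--     # of the flat license; a stack frame per open node holds (remaining
--     # children, num_metadata, child value lists).
--     p = pos
--     stack = []
--     while True:
--         num_child = license[p]
--         num_metadata = license[p + 1]
--         if num_child != 0:
--             stack.append((num_child, num_metadata, []))
--             p += 2
--             continue
--         value = license[p + 2:p + 2 + num_metadata]
--         p = p + 2 + num_metadata
--         # close every frame completed by this value
--         while stack:
--             remaining, nm, child_values = stack[-1]
--             child_values.append(value)
--             if remaining != 1:
--                 stack[-1] = (remaining - 1, nm, child_values)
--                 break
--             stack.pop()
--             value = []
--             for m in license[p:p + nm]:
--                 if 0 < m and m <= len(child_values):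
--                     value += child_values[m - 1]
--             p += nm
--         if not stack:
--             return value, p - pos
-- ===== Notes on version B (the rewrite author's own statement) =====
-- stated objective: alternative
-- what changed: A's recursive tree walk (recursion per node, appending child results inside a counted for-loop) is replaced by a non-recursive single left-to-right scan over the flat license with an explicit stack of open-node frames (remaining children, num_metadata, collected child values) that are closed as their last child completes.
-- outside the precondition, e.g. on part_two([-1, 0, 0, 0], 0): A returns ([], 4), B raises IndexError; on part_two([1, 0, 0, -2], 0): A returns ([], 2), B returns ([], 2)
import Mathlib
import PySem

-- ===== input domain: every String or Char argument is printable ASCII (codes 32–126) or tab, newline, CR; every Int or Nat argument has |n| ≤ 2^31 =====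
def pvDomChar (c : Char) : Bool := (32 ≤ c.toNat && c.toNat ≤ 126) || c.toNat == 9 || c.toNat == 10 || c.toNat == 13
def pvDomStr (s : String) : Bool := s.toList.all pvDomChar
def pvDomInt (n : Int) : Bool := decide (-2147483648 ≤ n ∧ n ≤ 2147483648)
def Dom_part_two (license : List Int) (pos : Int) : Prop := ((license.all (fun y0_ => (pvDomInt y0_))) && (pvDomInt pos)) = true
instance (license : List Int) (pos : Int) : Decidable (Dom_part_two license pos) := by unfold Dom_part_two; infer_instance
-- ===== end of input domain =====

-- B replaces A's recursive tree walk by an iterative single left-to-right scan with an explicit stack of open-node frames (objective: alternative).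


-- ===== PORT A =====
-- A is recursive; the port carries a fuel argument (list length + 1 always suffices on Pre_ inputs).
def partTwoFuel : Nat → List Int → Int → List Int × Int
  | 0, _, _ => ([], 0)
  | Nat.succ f, license, pos =>
    let num_child := (PySem.List.pyGet? license pos).getD 0
    let num_metadata := (PySem.List.pyGet? license (pos + 1)).getD 0
    if num_child = 0 then
      (PySem.List.slice license (some (pos + 2)) (some (pos + 2 + num_metadata)), 2 + num_metadata)
    else
      let first := partTwoFuel f license (pos + 2)
      let st := (List.range (num_child - 1).toNat).foldl
        (fun (st : List (List Int) × Int) _ =>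
          let r := partTwoFuel f license (pos + 2 + st.2)
          (st.1 ++ [r.1], st.2 + r.2))
        ([first.1], first.2)
      let metadata := PySem.List.slice license (some (pos + 2 + st.2)) (some (pos + 2 + st.2 + num_metadata))
      let res := metadata.foldl
        (fun acc m => if 0 < m ∧ m ≤ (st.1.length : Int) then acc ++ (PySem.List.pyGet? st.1 (m - 1)).getD [] else acc) []
      (res, st.2 + 2 + num_metadata)

def part_two (license : List Int) (pos : Int) : List Int × Int :=
  partTwoFuel (license.length + 1) license pos

-- ===== PORT B =====
-- inner while loop of Source B: close every stack frame completed by the value just produced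
def closeFrames (license : List Int) :
    List (Int × Int × List (List Int)) → List Int → Int →
    List (Int × Int × List (List Int)) × List Int × Int
  | [], value, p => ([], value, p)
  | (remaining, nm, child_values) :: rest, value, p =>
    let cvs := child_values ++ [value]
    if remaining ≠ 1 then ((remaining - 1, nm, cvs) :: rest, value, p)
    else
      let v := (PySem.List.slice license (some p) (some (p + nm))).foldl
        (fun acc m => if 0 < m ∧ m ≤ (cvs.length : Int) then acc ++ (PySem.List.pyGet? cvs (m - 1)).getD [] else acc) []
      closeFrames license rest v (p + nm)

-- outer while loop of Source B (fueled; one fuel unit per node, list length + 1 suffices on Pre_ inputs)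
def bLoop : List Int → Nat → List (Int × Int × List (List Int)) → Int → Int → List Int × Int
  | _, 0, _, _, _ => ([], 0)
  | license, Nat.succ f, stack, p, pos =>
    let num_child := (PySem.List.pyGet? license p).getD 0
    let num_metadata := (PySem.List.pyGet? license (p + 1)).getD 0
    if num_child ≠ 0 then bLoop license f ((num_child, num_metadata, []) :: stack) (p + 2) pos
    else
      let value := PySem.List.slice license (some (p + 2)) (some (p + 2 + num_metadata))
      let r := closeFrames license stack value (p + 2 + num_metadata)
      if r.1.isEmpty then (r.2.1, r.2.2 - pos) else bLoop license f r.1 r.2.2 pos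

def part_two_alt (license : List Int) (pos : Int) : List Int × Int :=
  bLoop license (license.length + 1) [] pos pos

-- ===== PRECONDITION & SPEC =====
-- total size of a run of k consecutive well-formed nodes, given a single-node checker
def seqF (node : Int → Option Int) : Int → Nat → Option Int
  | _, 0 => some 0
  | p, Nat.succ k =>
    match node p with
    | some s =>
      match seqF node (p + s) k with
      | some ts => some (s + ts)
      | none => none
    | none => none

-- size of the well-formed node at position pos, or none (child and metadata counts are
-- nonnegative and every node-header read is in range); fuel bounds the tree depth
def chk : Nat → List Int → Int → Option Int
  | 0, _, _ => none
  | Nat.succ f, L, pos =>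
    match PySem.List.pyGet? L pos, PySem.List.pyGet? L (pos + 1) with
    | some nc, some nm =>
      if 0 ≤ nc ∧ 0 ≤ nm then
        match seqF (fun q => chk f L q) (pos + 2) nc.toNat with
        | some ts => some (ts + 2 + nm)
        | none => none
      else none
    | _, _ => none

-- Pre_ excludes the inputs on which A raises (out-of-range reads, runaway recursion) and the
-- degenerate inputs on which A's returned value is an artefact of its implementation (a
-- negative child count silently read as one child, a negative metadata count below a non-leaf
-- node): it admits every license whose entry at pos starts a well-formed metadata tree, and
-- every single-leaf read (license[pos] == 0) regardless of the metadata count.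
def Pre_part_two (license : List Int) (pos : Int) : Prop :=
  (chk (license.length + 1) license pos).isSome = true ∨
    (PySem.List.pyGet? license pos = some 0 ∧
      (PySem.List.pyGet? license (pos + 1)).isSome = true)
instance (license : List Int) (pos : Int) : Decidable (Pre_part_two license pos) := by
  unfold Pre_part_two; infer_instance

def pvWitness_part_two : List Int × Int := ([2, 3, 0, 3, 10, 11, 12, 1, 1, 0, 1, 99, 2, 1, 1, 2], 0)

def Spec_part_two (license : List Int) (pos : Int) (out : List Int × Int) : Prop := out = part_two_alt license pos
instance (license : List Int) (pos : Int) (out : List Int × Int) : Decidable (Spec_part_two license pos out) := by unfold Spec_part_two; infer_instance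

-- ===== CLAIM (what is proved, stated in full; the proofs are below) =====
def Claim_equal_part_two : Prop := ∀ (license : List Int) (pos : Int), Dom_part_two license pos → Pre_part_two license pos → Spec_part_two license pos (part_two license pos)

-- ===== LEMMAS AND PROOFS =====

-- resolve a node's metadata indices against the child value lists (shared shape of both ports' final loop)
def mval (cvs : List (List Int)) (md : List Int) : List Int :=
  md.foldl (fun acc m => if 0 < m ∧ m ≤ (cvs.length : Int) then acc ++ (PySem.List.pyGet? cvs (m - 1)).getD [] else acc) []

-- canonical (value, size, node count) of the node at pos, mirroring chk's recursion shape
def kidsF (node : Int → List Int × Int × Nat) : Int → Nat → List (List Int) × Int × Nat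
  | _, 0 => ([], 0, 0)
  | p, Nat.succ k =>
    let r := node p
    let rest := kidsF node (p + r.2.1) k
    (r.1 :: rest.1, r.2.1 + rest.2.1, r.2.2 + rest.2.2)

def avF : Nat → List Int → Int → List Int × Int × Nat
  | 0, _, _ => ([], 0, 1)
  | Nat.succ f, L, pos =>
    let nc := (PySem.List.pyGet? L pos).getD 0
    let nm := (PySem.List.pyGet? L (pos + 1)).getD 0
    if nc = 0 then (PySem.List.slice L (some (pos + 2)) (some (pos + 2 + nm)), 2 + nm, 1)
    else
      let ks := kidsF (avF f L) (pos + 2) nc.toNat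
      (mval ks.1 (PySem.List.slice L (some (pos + 2 + ks.2.1)) (some (pos + 2 + ks.2.1 + nm))),
       ks.2.1 + 2 + nm, 1 + ks.2.2)

-- the state reached by Source B's outer loop right after a node's value has been produced
def resume (license : List Int) (g : Nat) (st : List (Int × Int × List (List Int)))
    (value : List Int) (p pos : Int) : List Int × Int :=
  let r := closeFrames license st value p
  if r.1.isEmpty then (r.2.1, r.2.2 - pos) else bLoop license g r.1 r.2.2 pos

-- chk's size agrees with avF's size; sizes are ≥ 2·(node count) (and ≥ 0)
theorem chk_avF (f : Nat) :
    (∀ (L : List Int) (p s : Int), chk f L p = some s →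
      (avF f L p).2.1 = s ∧ 2 * ((avF f L p).2.2 : Int) ≤ s) ∧
    (∀ (k : Nat) (L : List Int) (p ts : Int), seqF (fun q => chk f L q) p k = some ts →
      (kidsF (avF f L) p k).2.1 = ts ∧ 2 * ((kidsF (avF f L) p k).2.2 : Int) ≤ ts) := by
  induction f with
  | zero =>
    constructor
    · intro L p s h; simp [chk] at h
    · intro k L p ts h
      cases k with
      | zero => simp [seqF] at h; simp [kidsF]; omega
      | succ k => simp [seqF, chk] at h
  | succ f ih =>
    have hnode : ∀ (L : List Int) (p s : Int), chk (f+1) L p = some s →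
        (avF (f+1) L p).2.1 = s ∧ 2 * ((avF (f+1) L p).2.2 : Int) ≤ s := by
      intro L p s h
      rw [chk] at h
      rcases h1 : PySem.List.pyGet? L p with _ | nc <;> rw [h1] at h <;> try simp at h
      rcases h2 : PySem.List.pyGet? L (p+1) with _ | nm <;> rw [h2] at h <;> try simp at h
      obtain ⟨hg, h⟩ := h
      rcases h3 : seqF (fun q => chk f L q) (p+2) nc.toNat with _ | ts <;> rw [h3] at h
      · simp at h
      · simp at h
        have hs := h
        have hseq := ih.2 nc.toNat L (p+2) ts h3
        by_cases hz : nc = 0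
        · subst hz
          simp [seqF] at h3
          simp [avF, h1, h2]
          omega
        · simp [avF, h1, h2, hz]
          constructor
          · omega
          · omega
    refine ⟨hnode, ?_⟩
    intro k
    induction k with
    | zero => intro L p ts h; simp [seqF] at h; simp [kidsF]; omega
    | succ k ihk =>
      intro L p ts h
      rw [seqF] at h
      rcases h1 : chk (f+1) L p with _ | s1 <;> rw [h1] at h <;> try simp at h
      rcases h2 : seqF (fun q => chk (f+1) L q) (p + s1) k with _ | ts' <;> rw [h2] at h <;> try simp at h
      replace h : s1 + ts' = ts := h
      obtain ⟨e1, c1⟩ := hnode L p s1 h1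
      obtain ⟨e2, c2⟩ := ihk L (p + s1) ts' h2
      simp [kidsF, e1, e2]
      constructor
      · omega
      · omega

-- A-side: on a well-formed run of k nodes, A's child loop appends the canonical values and sizes
theorem partTwoFuel_eq (f : Nat) :
    (∀ (L : List Int) (p s : Int), chk f L p = some s → ∀ g, f ≤ g →
      partTwoFuel g L p = ((avF f L p).1, s)) ∧
    (∀ (k : Nat) (L : List Int) (p ts : Int), seqF (fun q => chk f L q) p k = some ts →
      ∀ g, f ≤ g → ∀ (acc : List (List Int)) (ts0 pos : Int), p = pos + 2 + ts0 →
      (List.range k).foldl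
        (fun (st : List (List Int) × Int) _ =>
          let r := partTwoFuel g L (pos + 2 + st.2)
          (st.1 ++ [r.1], st.2 + r.2)) (acc, ts0)
      = (acc ++ (kidsF (avF f L) p k).1, ts0 + ts)) := by
  induction f with
  | zero =>
    constructor
    · intro L p s h; simp [chk] at h
    · intro k L p ts h g hg acc ts0 pos hp
      cases k with
      | zero => simp [seqF] at h; simp [kidsF]; omega
      | succ k => rw [seqF] at h; simp [chk] at h
  | succ f ih =>
    have hnode : ∀ (L : List Int) (p s : Int), chk (f+1) L p = some s → ∀ g, f+1 ≤ g →
        partTwoFuel g L p = ((avF (f+1) L p).1, s) := by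
      intro L p s h g hg
      obtain ⟨g', rfl⟩ : ∃ g', g = g'+1 := ⟨g-1, by omega⟩
      rw [chk] at h
      rcases h1 : PySem.List.pyGet? L p with _ | nc <;> rw [h1] at h <;> try simp at h
      rcases h2 : PySem.List.pyGet? L (p+1) with _ | nm <;> rw [h2] at h <;> try simp at h
      obtain ⟨hg2, h⟩ := h
      rcases h3 : seqF (fun q => chk f L q) (p+2) nc.toNat with _ | ts <;> rw [h3] at h
      · simp at h
      · simp at h
        have hs := h
        by_cases hz : nc = 0
        · subst hz
          simp [seqF] at h3
          rw [partTwoFuel]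
          simp [avF, h1, h2]
          omega
        · -- internal node: nc ≥ 1
          have hnc1 : nc.toNat = (nc.toNat - 1) + 1 := by omega
          rw [hnc1, seqF] at h3
          rcases h4 : chk f L (p+2) with _ | s1 <;> rw [h4] at h3 <;> try simp at h3
          rcases h5 : seqF (fun q => chk f L q) (p+2+s1) (nc.toNat - 1) with _ | ts' <;>
            rw [h5] at h3 <;> try simp at h3
          have hfirst := ih.1 L (p+2) s1 h4 g' (by omega)
          have hloop := ih.2 (nc.toNat - 1) L (p+2+s1) ts' h5 g' (by omega)
            [(avF f L (p+2)).1] s1 p rfl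
          have hks1 := (chk_avF f).1 L (p+2) s1 h4
          rw [partTwoFuel]
          simp only [h1, h2, Option.getD_some, if_neg hz]
          rw [hfirst]
          simp only []
          have hrange : (nc - 1).toNat = nc.toNat - 1 := by omega
          rw [hrange, hloop]
          have hAv : avF (f+1) L p =
              (mval (kidsF (avF f L) (p+2) nc.toNat).1
                (PySem.List.slice L (some (p + 2 + (kidsF (avF f L) (p+2) nc.toNat).2.1))
                  (some (p + 2 + (kidsF (avF f L) (p+2) nc.toNat).2.1 + nm))),
               (kidsF (avF f L) (p+2) nc.toNat).2.1 + 2 + nm,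
               1 + (kidsF (avF f L) (p+2) nc.toNat).2.2) := by
            rw [avF]; simp [h1, h2, hz]
          have hkid : kidsF (avF f L) (p+2) nc.toNat =
              ((avF f L (p+2)).1 :: (kidsF (avF f L) (p+2+s1) (nc.toNat - 1)).1,
               s1 + (kidsF (avF f L) (p+2+s1) (nc.toNat - 1)).2.1,
               (avF f L (p+2)).2.2 + (kidsF (avF f L) (p+2+s1) (nc.toNat - 1)).2.2) := by
            rw [hnc1, kidsF]
            simp [hks1.1]
          rw [hAv, hkid]
          have hts : (kidsF (avF f L) (p+2+s1) (nc.toNat - 1)).2.1 = ts' :=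
            ((chk_avF f).2 (nc.toNat - 1) L (p+2+s1) ts' h5).1
          simp only [hts, mval, List.singleton_append]
          congr 1
          omega
    refine ⟨hnode, ?_⟩
    intro k
    induction k with
    | zero =>
      intro L p ts h g hg acc ts0 pos hp
      simp [seqF] at h; simp [kidsF]; omega
    | succ k ihk =>
      intro L p ts h g hg acc ts0 pos hp
      rw [seqF] at h
      rcases h1 : chk (f+1) L p with _ | s1 <;> rw [h1] at h <;> try simp at h
      rcases h2 : seqF (fun q => chk (f+1) L q) (p + s1) k with _ | ts' <;> rw [h2] at h <;> try simp at h
      have hfirst := hnode L p s1 h1 g hg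
      have hs1 := ((chk_avF (f+1)).1 L p s1 h1).1
      rw [List.range_succ_eq_map, List.foldl_cons, List.foldl_map]
      have hstep : (fun (st : List (List Int) × Int) _ =>
            ((st.1 ++ [(partTwoFuel g L (pos + 2 + st.2)).1], st.2 + (partTwoFuel g L (pos + 2 + st.2)).2) : List (List Int) × Int)) (acc, ts0) 0
          = (acc ++ [(avF (f+1) L p).1], ts0 + s1) := by
        simp only []
        rw [← hp, hfirst]
      have hrest := ihk L (p + s1) ts' h2 g hg (acc ++ [(avF (f+1) L p).1]) (ts0 + s1) pos (by omega)
      simp only [] at hstep ⊢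
      rw [hstep, hrest]
      have hkid : kidsF (avF (f+1) L) p (k+1) =
          ((avF (f+1) L p).1 :: (kidsF (avF (f+1) L) (p+s1) k).1,
           s1 + (kidsF (avF (f+1) L) (p+s1) k).2.1,
           (avF (f+1) L p).2.2 + (kidsF (avF (f+1) L) (p+s1) k).2.2) := by
        rw [kidsF]
        simp [hs1]
      rw [hkid]
      simp
      omega

-- B-side: processing a well-formed node (resp. the remaining k children of the top frame)
-- advances Source B's loop to the corresponding resume state
theorem bLoop_eq (f : Nat) :
    (∀ (L : List Int) (p s : Int), chk f L p = some s →
      ∀ (g : Nat) st (pos : Int),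
        bLoop L (g + (avF f L p).2.2) st p pos = resume L g st (avF f L p).1 (p + s) pos) ∧
    (∀ (k : Nat) (L : List Int) (p ts : Int), seqF (fun q => chk f L q) p k = some ts → 0 < k →
      ∀ (g : Nat) (nm : Int) (acc : List (List Int)) st (pos : Int),
        bLoop L (g + (kidsF (avF f L) p k).2.2) (((k : Int), nm, acc) :: st) p pos
        = resume L g st
            (mval (acc ++ (kidsF (avF f L) p k).1)
              (PySem.List.slice L (some (p + ts)) (some (p + ts + nm))))
            (p + ts + nm) pos) := by
  induction f with
  | zero =>
    constructor
    · intro L p s h; simp [chk] at h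
    · intro k L p ts h hk
      cases k with
      | zero => omega
      | succ k => rw [seqF] at h; simp [chk] at h
  | succ f ih =>
    have hnode : ∀ (L : List Int) (p s : Int), chk (f+1) L p = some s →
        ∀ (g : Nat) st (pos : Int),
          bLoop L (g + (avF (f+1) L p).2.2) st p pos
            = resume L g st (avF (f+1) L p).1 (p + s) pos := by
      intro L p s h g st pos
      rw [chk] at h
      rcases h1 : PySem.List.pyGet? L p with _ | nc <;> rw [h1] at h <;> try simp at h
      rcases h2 : PySem.List.pyGet? L (p+1) with _ | nm <;> rw [h2] at h <;> try simp at h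
      obtain ⟨hg2, h⟩ := h
      rcases h3 : seqF (fun q => chk f L q) (p+2) nc.toNat with _ | ts <;> rw [h3] at h
      · simp at h
      · simp at h
        have hs := h
        by_cases hz : nc = 0
        · subst hz
          simp [seqF] at h3
          have hval : (avF (f+1) L p).1 = PySem.List.slice L (some (p + 2)) (some (p + 2 + nm)) := by
            rw [avF]; simp [h1, h2]
          have hcnt : (avF (f+1) L p).2.2 = 1 := by rw [avF]; simp [h1, h2]
          rw [hcnt, hval, bLoop]
          simp only [h1, h2, Option.getD_some]
          rw [if_neg (by simp : ¬ ((0:Int) ≠ 0))]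
          have hp : p + s = p + 2 + nm := by omega
          rw [hp, resume]
        · have hnc1 : nc.toNat = (nc.toNat - 1) + 1 := by omega
          have hAv : avF (f+1) L p =
              (mval (kidsF (avF f L) (p+2) nc.toNat).1
                (PySem.List.slice L (some (p + 2 + (kidsF (avF f L) (p+2) nc.toNat).2.1))
                  (some (p + 2 + (kidsF (avF f L) (p+2) nc.toNat).2.1 + nm))),
               (kidsF (avF f L) (p+2) nc.toNat).2.1 + 2 + nm,
               1 + (kidsF (avF f L) (p+2) nc.toNat).2.2) := by
            rw [avF]; simp [h1, h2, hz]
          have hts : (kidsF (avF f L) (p+2) nc.toNat).2.1 = ts :=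
            ((chk_avF f).2 nc.toNat L (p+2) ts h3).1
          rw [hAv]
          simp only []
          have hfuel : g + (1 + (kidsF (avF f L) (p+2) nc.toNat).2.2)
              = (g + (kidsF (avF f L) (p+2) nc.toNat).2.2) + 1 := by omega
          rw [hfuel, bLoop]
          simp only [h1, h2, Option.getD_some, if_pos hz]
          have hcast : ((nc.toNat : Int), nm, ([] : List (List Int))) = (nc, nm, []) := by
            simp [Int.toNat_of_nonneg hg2.1]
          rw [← hcast]
          rw [ih.2 nc.toNat L (p+2) ts h3 (by omega) (g) nm [] st pos]
          rw [hts]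
          simp only [List.nil_append]
          have hp : p + s = p + 2 + ts + nm := by omega
          rw [hp]
    refine ⟨hnode, ?_⟩
    intro k
    induction k with
    | zero => intro L p ts h hk; omega
    | succ k ihk =>
      intro L p ts h hk g nm acc st pos
      rw [seqF] at h
      rcases h1 : chk (f+1) L p with _ | s1 <;> rw [h1] at h <;> try simp at h
      rcases h2 : seqF (fun q => chk (f+1) L q) (p + s1) k with _ | ts' <;> rw [h2] at h <;> try simp at h
      have hs1 := ((chk_avF (f+1)).1 L p s1 h1).1
      have hkid : kidsF (avF (f+1) L) p (k+1) =
          ((avF (f+1) L p).1 :: (kidsF (avF (f+1) L) (p+s1) k).1,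
           s1 + (kidsF (avF (f+1) L) (p+s1) k).2.1,
           (avF (f+1) L p).2.2 + (kidsF (avF (f+1) L) (p+s1) k).2.2) := by
        rw [kidsF]
        simp [hs1]
      have hts' : (kidsF (avF (f+1) L) (p+s1) k).2.1 = ts' :=
        ((chk_avF (f+1)).2 k L (p+s1) ts' h2).1
      rw [hkid]
      simp only []
      have hfuel : g + ((avF (f+1) L p).2.2 + (kidsF (avF (f+1) L) (p+s1) k).2.2)
          = (g + (kidsF (avF (f+1) L) (p+s1) k).2.2) + (avF (f+1) L p).2.2 := by omega
      rw [hfuel]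
      rw [hnode L p s1 h1 (g + (kidsF (avF (f+1) L) (p+s1) k).2.2) _ pos]
      cases k with
      | zero =>
        simp [seqF] at h2
        subst h2
        have hts2 : ts = s1 := by omega
        subst hts2
        rw [resume, resume]
        simp only [closeFrames, kidsF, mval]
        norm_num
      | succ k' =>
        rw [resume]
        simp only [closeFrames]
        rw [if_pos (show ((((k' + 1 + 1 : Nat)) : Int) ≠ 1) by push_cast; omega)]
        simp only [List.isEmpty_cons, Bool.false_eq_true, if_false]
        have hdec : (((k' + 1 + 1 : Nat) : Int) - 1) = ((k' + 1 : Nat) : Int) := by push_cast; ring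
        rw [hdec]
        rw [ihk L (p + s1) ts' h2 (by omega) g nm (acc ++ [(avF (f+1) L p).1]) st pos]
        have hassoc : acc ++ [(avF (f+1) L p).1] ++ (kidsF (avF (f+1) L) (p+s1) (k'+1)).1
            = acc ++ ((avF (f+1) L p).1 :: (kidsF (avF (f+1) L) (p+s1) (k'+1)).1) := by
          simp
        rw [hassoc]
        rw [show p + s1 + ts' = p + ts from by omega]

-- ===== VERDICT (by name: the statement is the Claim_ definition above) =====
-- node-header reads are in range and node positions advance by at least 2, so the node count
-- of a well-formed node at p fits in the fuel budget: p + 2*count ≤ length + 2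
theorem chk_space (f : Nat) :
    (∀ (L : List Int) (p s : Int), chk f L p = some s →
      -(L.length : Int) ≤ p ∧ p + 2 * ((avF f L p).2.2 : Int) ≤ (L.length : Int) + 2) ∧
    (∀ (k : Nat) (L : List Int) (p ts : Int), seqF (fun q => chk f L q) p k = some ts → 0 < k →
      p + 2 * ((kidsF (avF f L) p k).2.2 : Int) ≤ (L.length : Int) + 2) := by
  induction f with
  | zero =>
    constructor
    · intro L p s h; simp [chk] at h
    · intro k L p ts h hk
      cases k with
      | zero => omega
      | succ k => rw [seqF] at h; simp [chk] at h
  | succ f ih =>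
    have hnode : ∀ (L : List Int) (p s : Int), chk (f+1) L p = some s →
        -(L.length : Int) ≤ p ∧ p + 2 * ((avF (f+1) L p).2.2 : Int) ≤ (L.length : Int) + 2 := by
      intro L p s h
      rw [chk] at h
      rcases h1 : PySem.List.pyGet? L p with _ | nc <;> rw [h1] at h <;> try simp at h
      rcases h2 : PySem.List.pyGet? L (p+1) with _ | nm <;> rw [h2] at h <;> try simp at h
      obtain ⟨hg, h⟩ := h
      have hin : PySem.Raise.InRange L.length p := by
        by_contra hc
        rw [← PySem.List.pyGet?_eq_none_iff (xs := L)] at hc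
        rw [h1] at hc
        simp at hc
      unfold PySem.Raise.InRange at hin
      rcases h3 : seqF (fun q => chk f L q) (p+2) nc.toNat with _ | ts <;> rw [h3] at h
      · simp at h
      · by_cases hz : nc = 0
        · subst hz
          have hcnt : (avF (f+1) L p).2.2 = 1 := by rw [avF]; simp [h1, h2]
          rw [hcnt]
          omega
        · have hcnt : (avF (f+1) L p).2.2 = 1 + (kidsF (avF f L) (p+2) nc.toNat).2.2 := by
            rw [avF]; simp [h1, h2, hz]
          have hk : 0 < nc.toNat := by omega
          have := ih.2 nc.toNat L (p+2) ts h3 hk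
          rw [hcnt]
          omega
    refine ⟨hnode, ?_⟩
    intro k
    induction k with
    | zero => intro L p ts h hk; omega
    | succ k ihk =>
      intro L p ts h _
      rw [seqF] at h
      rcases h1 : chk (f+1) L p with _ | s1 <;> rw [h1] at h <;> try simp at h
      rcases h2 : seqF (fun q => chk (f+1) L q) (p + s1) k with _ | ts' <;> rw [h2] at h <;> try simp at h
      have hs1 := ((chk_avF (f+1)).1 L p s1 h1).1
      have hsz := ((chk_avF (f+1)).1 L p s1 h1).2
      have hkid : (kidsF (avF (f+1) L) p (k+1)).2.2
          = (avF (f+1) L p).2.2 + (kidsF (avF (f+1) L) (p+s1) k).2.2 := by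
        rw [kidsF]; simp [hs1]
      rw [hkid]
      have hfst := (hnode L p s1 h1).2
      cases k with
      | zero => simp [kidsF]; omega
      | succ k' =>
        have := ihk L (p+s1) ts' h2 (by omega)
        omega

theorem part_two_spec : Claim_equal_part_two := by
  intro L pos _ hpre
  unfold Spec_part_two
  unfold Pre_part_two at hpre
  rcases hs : chk (L.length + 1) L pos with _ | s
  · -- Pre_ holds through the top-level-leaf disjunct
    rw [hs] at hpre
    simp only [Option.isSome_none, Bool.false_eq_true, false_or] at hpre
    obtain ⟨hz, hsome⟩ := hpre
    rcases hnm : PySem.List.pyGet? L (pos + 1) with _ | nm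
    · rw [hnm] at hsome; simp at hsome
    · unfold part_two part_two_alt
      rw [partTwoFuel, bLoop]
      simp only [hz, hnm, Option.getD_some]
      simp only [ne_eq, not_true_eq_false, if_true, if_false]
      simp only [closeFrames, List.isEmpty_nil, if_true]
      congr 1
      ring
  · have hA : part_two L pos = ((avF (L.length + 1) L pos).1, s) :=
      (partTwoFuel_eq (L.length + 1)).1 L pos s hs (L.length + 1) le_rfl
    have hbd := (chk_space (L.length + 1)).1 L pos s hs
    have hfuel : L.length + 1
        = (L.length + 1 - (avF (L.length + 1) L pos).2.2) + (avF (L.length + 1) L pos).2.2 := by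
      omega
    have hB := (bLoop_eq (L.length + 1)).1 L pos s hs
      (L.length + 1 - (avF (L.length + 1) L pos).2.2) [] pos
    unfold part_two_alt
    rw [hfuel, hB, resume]
    simp only [closeFrames, List.isEmpty_nil, if_true]
    rw [hA]
    congr 1
    omega
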